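-- pv_equiv track=rewrite | github.com/tgy1201/coding-test | 프로그래머스/2/132265. 롤케이크 자르기/롤케이크 자르기.py | solution
-- ===== SOURCE A (Python) =====
-- def solution(topping):
--     a = set()
--     b = set()
--
--     aa = []
--     bb = []
--     answer = 0
--     start = 0
--     end = len(topping) - 1
--
--
--     for i in range(len(topping)):
--         a.add(topping[i])
--         b.add(topping[len(topping)-1-i])
--
--         aa.append(len(a))
--         bb.append(len(b))
--     bb.reverse()
--
--     for i in range(len(topping)-1):
--         if aa[i] == bb[i+1]:
--             answer += 1
--     return answer
-- ===== SOURCE B (Python) =====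
-- def solution(topping):
--     # One incremental pass: live multiset of the right half, live set of the left half.
--     right = {}
--     for t in topping:
--         right[t] = right.get(t, 0) + 1
--     distinct_right = len(right)
--     left = set()
--     answer = 0
--     for t in topping[:-1]:
--         left.add(t)
--         right[t] -= 1
--         if right[t] == 0:
--             distinct_right -= 1
--         if len(left) == distinct_right:
--             answer += 1
--     return answer
-- ===== Notes on version B (the rewrite author's own statement) =====
-- stated objective: simpler
-- what changed: Replaces A's precomputed prefix/suffix distinct-count arrays (built in a mirrored-index loop, then a reverse and an indexed comparison loop) by a single incremental pass that keeps a live left-half set and a live right-half multiset (dict of counts with a running distinct counter), comparing the two distinct counts at each cut point.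
import Mathlib
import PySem

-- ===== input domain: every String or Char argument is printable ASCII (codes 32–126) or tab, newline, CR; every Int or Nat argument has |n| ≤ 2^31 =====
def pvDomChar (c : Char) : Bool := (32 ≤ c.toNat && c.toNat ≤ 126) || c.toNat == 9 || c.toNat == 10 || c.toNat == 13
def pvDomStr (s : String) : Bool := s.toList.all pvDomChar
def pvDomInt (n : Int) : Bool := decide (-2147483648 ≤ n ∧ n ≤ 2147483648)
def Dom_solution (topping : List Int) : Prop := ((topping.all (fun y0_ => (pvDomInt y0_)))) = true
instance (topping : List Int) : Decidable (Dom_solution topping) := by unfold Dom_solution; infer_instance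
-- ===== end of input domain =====

-- B replaces A's two precomputed prefix/suffix distinct-count arrays by one incremental pass
-- holding a live left set and a live right multiset (dict) — simpler, no arrays, no reverse.

-- ===== PORT A =====
-- loop body of A's first for-loop (state: (a, b, aa, bb)); indexing is always in range, so pyGetD's default is never used
def aStep (topping : List Int) (n : Int)
    (st : PySem.Set Int × PySem.Set Int × List Int × List Int) (i : Int) :
    PySem.Set Int × PySem.Set Int × List Int × List Int :=
  let a := PySem.Set.add st.1 (PySem.List.pyGetD topping i 0)
  let b := PySem.Set.add st.2.1 (PySem.List.pyGetD topping (n - 1 - i) 0)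
  (a, b, st.2.2.1 ++ [(a.length : Int)], st.2.2.2 ++ [(b.length : Int)])

def solution (topping : List Int) : Int :=
  let n : Int := PySem.List.len topping
  let st := (PySem.List.pyRange 0 n 1).foldl (aStep topping n)
    (PySem.Set.empty, PySem.Set.empty, ([] : List Int), ([] : List Int))
  let aa := st.2.2.1
  let bb := st.2.2.2.reverse
  (PySem.List.pyRange 0 (n - 1) 1).foldl
    (fun answer i =>
      if PySem.List.pyGetD aa i 0 == PySem.List.pyGetD bb (i + 1) 0 then answer + 1 else answer)
    0

-- ===== PORT B =====
-- loop body of B's single pass (state: (left, right, distinct_right, answer))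
def bStep (st : PySem.Set Int × PySem.Dict Int Int × Int × Int) (t : Int) :
    PySem.Set Int × PySem.Dict Int Int × Int × Int :=
  let left := PySem.Set.add st.1 t
  let right := st.2.1.insert t (st.2.1.getD t 0 - 1)
  let distinct := if right.getD t 0 == 0 then st.2.2.1 - 1 else st.2.2.1
  let answer := if ((left.length : Int) == distinct) then st.2.2.2 + 1 else st.2.2.2
  (left, right, distinct, answer)

def solution_alt (topping : List Int) : Int :=
  let right0 := topping.foldl (fun (d : PySem.Dict Int Int) t => d.insert t (d.getD t 0 + 1))
    PySem.Dict.empty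
  let st := (PySem.List.slice topping none (some (-1))).foldl bStep
    (PySem.Set.empty, right0, (right0.size : Int), 0)
  st.2.2.2

-- ===== PRECONDITION & SPEC =====
def Spec_solution (topping : List Int) (out : Int) : Prop := out = solution_alt topping
instance (topping : List Int) (out : Int) : Decidable (Spec_solution topping out) := by unfold Spec_solution; infer_instance

-- ===== CLAIM (what is proved, stated in full; the proofs are below) =====
def Claim_equal_solution : Prop := ∀ (topping : List Int), Dom_solution topping → Spec_solution topping (solution topping)

-- ===== LEMMAS AND PROOFS =====

-- number of distinct elements of a list
def dcount (xs : List Int) : Nat := (PySem.Set.ofList xs).length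

lemma dcount_eq_of_nodup_mem (xs ys : List Int) (hy : ys.Nodup)
    (h : ∀ a, a ∈ PySem.Set.ofList xs ↔ a ∈ ys) : dcount xs = ys.length :=
  ((List.perm_ext_iff_of_nodup (PySem.Set.nodup_ofList xs) hy).mpr h).length_eq

lemma dcount_reverse (xs : List Int) : dcount xs.reverse = dcount xs := by
  apply dcount_eq_of_nodup_mem _ _ (PySem.Set.nodup_ofList xs)
  intro a; simp [PySem.Set.mem_ofList]

lemma dcount_cons_mem (t : Int) (u : List Int) (h : t ∈ u) : dcount (t :: u) = dcount u := by
  apply dcount_eq_of_nodup_mem _ _ (PySem.Set.nodup_ofList u)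
  intro a
  simp only [PySem.Set.mem_ofList, List.mem_cons]
  constructor
  · rintro (rfl | ha) <;> [exact h; exact ha]
  · exact Or.inr

lemma dcount_cons_not_mem (t : Int) (u : List Int) (h : t ∉ u) :
    dcount (t :: u) = dcount u + 1 := by
  have : dcount (t :: u) = (t :: PySem.Set.ofList u).length := by
    apply dcount_eq_of_nodup_mem
    · exact List.nodup_cons.mpr ⟨by simpa [PySem.Set.mem_ofList] using h, PySem.Set.nodup_ofList u⟩
    · intro a; simp [PySem.Set.mem_ofList]
  simpa [dcount] using this

-- B's single pass computed: loop invariant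
lemma B_loop (r : List Int) : ∀ (p tail : List Int) (d : PySem.Dict Int Int) (ans : Int),
    (∀ k, d.getD k 0 = ((r ++ tail).count k : Int)) →
    (r.foldl bStep (PySem.Set.ofList p, d, ((dcount (r ++ tail) : Int)), ans)).2.2.2
      = ans + ((List.range r.length).countP
          (fun j => decide (dcount (p ++ r.take (j+1)) = dcount (r.drop (j+1) ++ tail))) : Int) := by
  induction r with
  | nil => intro p tail d ans _; simp
  | cons t r' ih =>
    intro p tail d ans hd
    rw [List.foldl_cons]
    have hcnt : d.getD t 0 = ((r' ++ tail).count t : Int) + 1 := by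
      have := hd t; simpa [List.count_cons_self] using this
    -- the new state after one step
    have hleft : PySem.Set.add (PySem.Set.ofList p) t = PySem.Set.ofList (p ++ [t]) :=
      (PySem.Set.ofList_append_singleton p t).symm
    have hd' : ∀ k, (d.insert t (d.getD t 0 - 1)).getD k 0 = ((r' ++ tail).count k : Int) := by
      intro k
      rw [PySem.Dict.getD_insert]
      split_ifs with hk
      · subst hk; rw [hcnt]; ring
      · rw [hd k]; rw [List.cons_append]; simp [List.count_cons]; omega
    have hread : (d.insert t (d.getD t 0 - 1)).getD t 0 = ((r' ++ tail).count t : Int) := hd' t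
    have hdist : (if (d.insert t (d.getD t 0 - 1)).getD t 0 == 0
        then (dcount ((t :: r') ++ tail) : Int) - 1 else (dcount ((t :: r') ++ tail) : Int))
        = (dcount (r' ++ tail) : Int) := by
      rw [hread]
      by_cases hmem : t ∈ r' ++ tail
      · have h0 : ((r' ++ tail).count t : Int) ≠ 0 := by
          have := List.count_pos_iff.mpr hmem
          omega
        rw [if_neg (by simpa using h0)]
        have := dcount_cons_mem t (r' ++ tail) hmem
        simp only [List.cons_append] at *
        omega
      · have h0 : ((r' ++ tail).count t : Int) = 0 := by
          simp [List.count_eq_zero.mpr hmem]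
        rw [if_pos (by simpa using h0)]
        have := dcount_cons_not_mem t (r' ++ tail) hmem
        simp only [List.cons_append] at *
        omega
    have hstep : bStep (PySem.Set.ofList p, d, (dcount ((t :: r') ++ tail) : Int), ans) t
        = (PySem.Set.ofList (p ++ [t]), d.insert t (d.getD t 0 - 1), (dcount (r' ++ tail) : Int),
           if ((dcount (p ++ [t]) : Int) == (dcount (r' ++ tail) : Int)) then ans + 1 else ans) := by
      show (_, _, _, _) = _
      rw [hleft, hdist]
      rfl
    rw [hstep, ih (p ++ [t]) tail _ _ hd']
    have hsplit : ((List.range (t :: r').length).countP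
          (fun j => decide (dcount (p ++ (t :: r').take (j+1)) = dcount ((t :: r').drop (j+1) ++ tail))))
        = (if dcount (p ++ [t]) = dcount (r' ++ tail) then 1 else 0)
          + ((List.range r'.length).countP
              (fun j => decide (dcount ((p ++ [t]) ++ r'.take (j+1)) = dcount (r'.drop (j+1) ++ tail)))) := by
      rw [List.length_cons, List.range_succ_eq_map, List.countP_cons, List.countP_map]
      simp only [List.take_succ_cons, List.drop_succ_cons, List.take_zero, List.drop_zero,
        Function.comp_def, List.append_assoc, List.singleton_append]
      by_cases hc : dcount (p ++ [t]) = dcount (r' ++ tail) <;> simp [hc, Nat.add_comm] <;> rfl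
    rw [hsplit]
    by_cases hc : dcount (p ++ [t]) = dcount (r' ++ tail)
    · simp only [hc, if_pos, beq_self_eq_true]
      push_cast; ring
    · have : ((dcount (p ++ [t]) : Int) == (dcount (r' ++ tail) : Int)) = false := by
        simp; exact fun h => absurd (by exact_mod_cast h) hc
      rw [this, if_neg (by simp), if_neg hc]
      push_cast; ring

lemma B_char (xs : List Int) : solution_alt xs
    = (((List.range (xs.length - 1)).countP
        (fun j => decide (dcount (xs.take (j+1)) = dcount (xs.drop (j+1))))) : Int) := by
  have hx : xs.dropLast ++ xs.drop (xs.length - 1) = xs := by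
    rw [List.dropLast_eq_take, List.take_append_drop]
  have hsize : ((PySem.Dict.counter xs).size : Int) = ((dcount (xs.dropLast ++ xs.drop (xs.length - 1)) : Nat) : Int) := by
    rw [hx]
    show ((PySem.Dict.counter xs).items.length : Int) = _
    rw [PySem.Dict.items_counter, List.length_map]
    rfl
  show ((PySem.List.slice xs none (some (-1))).foldl bStep
      (PySem.Set.empty, _, _, 0)).2.2.2 = _
  rw [PySem.List.slice_to_neg_one, PySem.Dict.foldl_insert_getD_add_one_eq_counter, hsize]
  have := B_loop xs.dropLast [] (xs.drop (xs.length - 1)) (PySem.Dict.counter xs) 0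
    (by intro k; rw [hx, PySem.Dict.getD_counter])
  rw [show (PySem.Set.empty : PySem.Set Int) = PySem.Set.ofList [] from rfl, this]
  rw [List.length_dropLast]
  have hcong : (List.range (xs.length - 1)).countP
        (fun j => decide (dcount ([] ++ xs.dropLast.take (j+1)) = dcount (xs.dropLast.drop (j+1) ++ xs.drop (xs.length - 1))))
      = (List.range (xs.length - 1)).countP
        (fun j => decide (dcount (xs.take (j+1)) = dcount (xs.drop (j+1)))) := by
    apply List.countP_congr
    intro j hj
    rw [List.mem_range] at hj
    have h1 : [] ++ xs.dropLast.take (j+1) = xs.take (j+1) := by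
      rw [List.nil_append, List.dropLast_eq_take, List.take_take]
      congr 1; omega
    have h2 : xs.dropLast.drop (j+1) ++ xs.drop (xs.length - 1) = xs.drop (j+1) := by
      conv_rhs => rw [← hx]
      rw [List.drop_append_of_le_length (by rw [List.length_dropLast]; omega)]
    rw [h1, h2]
  rw [hcong]
  ring

-- A's first loop computed
lemma A_loop (xs : List Int) : ∀ (m : Nat), m ≤ xs.length →
    (PySem.List.pyRange 0 (m : Int) 1).foldl (aStep xs (PySem.List.len xs))
      (PySem.Set.empty, PySem.Set.empty, ([] : List Int), ([] : List Int))
    = (PySem.Set.ofList (xs.take m), PySem.Set.ofList (xs.reverse.take m),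
       (List.range m).map (fun j => (dcount (xs.take (j+1)) : Int)),
       (List.range m).map (fun j => (dcount (xs.reverse.take (j+1)) : Int))) := by
  intro m
  induction m with
  | zero => intro _; rfl
  | succ m ih =>
    intro hm
    have hm' : m < xs.length := by omega
    have hr : PySem.List.pyRange 0 ((m + 1 : Nat) : Int) 1
        = PySem.List.pyRange 0 (m : Int) 1 ++ [(m : Int)] := by
      push_cast
      exact PySem.List.pyRange_one_succ_right (by positivity)
    rw [hr, List.foldl_append, ih (by omega), List.foldl_cons, List.foldl_nil]
    have hga : PySem.List.pyGetD xs (m : Int) 0 = xs[m] := by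
      rw [PySem.List.pyGetD_natCast, List.getD_eq_getElem _ _ hm']
    have hidx : PySem.List.len xs - 1 - (m : Int) = ((xs.length - 1 - m : Nat) : Int) := by
      rw [PySem.List.len_eq]; omega
    have hgb : PySem.List.pyGetD xs (PySem.List.len xs - 1 - (m : Int)) 0
        = xs.reverse[m]'(by simpa using hm') := by
      rw [hidx, PySem.List.pyGetD_natCast,
        List.getD_eq_getElem _ _ (by omega),
        List.getElem_reverse]
    have hta : xs.take (m+1) = xs.take m ++ [xs[m]] := by
      rw [List.take_add_one, List.getElem?_eq_getElem hm']; rfl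
    have htb : xs.reverse.take (m+1) = xs.reverse.take m ++ [xs.reverse[m]'(by simpa using hm')] := by
      rw [List.take_add_one, List.getElem?_eq_getElem (by simpa using hm')]; rfl
    show (_, _, _, _) = (_, _, _, _)
    rw [hga, hgb, hta, htb, PySem.Set.ofList_append_singleton, PySem.Set.ofList_append_singleton,
      List.range_succ, List.map_append, List.map_append]
    have haa : ((((PySem.Set.ofList (xs.take m)).add xs[m]).length : Nat) : Int)
        = ((dcount (xs.take (m+1)) : Nat) : Int) := by
      rw [dcount, hta, PySem.Set.ofList_append_singleton]
    have hbb : ((((PySem.Set.ofList (xs.reverse.take m)).add (xs.reverse[m]'(by simpa using hm'))).length : Nat) : Int)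
        = ((dcount (xs.reverse.take (m+1)) : Nat) : Int) := by
      rw [dcount, htb, PySem.Set.ofList_append_singleton]
    simp only [Prod.mk.injEq]
    refine ⟨trivial, trivial, ?_, ?_⟩
    · rw [haa]; simp
    · rw [hbb]; simp

lemma A_char (xs : List Int) : solution xs
    = (((List.range (xs.length - 1)).countP
        (fun j => decide (dcount (xs.take (j+1)) = dcount (xs.drop (j+1))))) : Int) := by
  rcases List.eq_nil_or_concat xs with rfl | ⟨_, _, rfl⟩
  · rfl
  rename_i ys z
  simp only [List.concat_eq_append]
  set xs := ys ++ [z] with hxs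
  have hlen : 1 ≤ xs.length := by simp [hxs]
  show ((PySem.List.pyRange 0 (PySem.List.len xs - 1) 1).foldl _ 0) = _
  have hn : PySem.List.len xs = (xs.length : Int) := PySem.List.len_eq xs
  have hrn : PySem.List.pyRange 0 (PySem.List.len xs) 1
      = PySem.List.pyRange 0 ((xs.length : Nat) : Int) 1 := by rw [hn]
  rw [hrn, A_loop xs xs.length le_rfl]
  dsimp only
  have hr1 : PySem.List.pyRange 0 (PySem.List.len xs - 1) 1
      = List.map (fun k : Nat => (k : Int)) (List.range (xs.length - 1)) := by
    rw [hn, show ((xs.length : Int) - 1) = ((xs.length - 1 : Nat) : Int) by omega]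
    exact PySem.List.pyRange_zero_natCast _
  rw [hr1, List.foldl_map]
  have hbody : ∀ (j : Nat), j ∈ List.range (xs.length - 1) → ∀ (acc : Int),
      (if PySem.List.pyGetD ((List.range xs.length).map (fun j => (dcount (xs.take (j+1)) : Int))) ((j : Nat) : Int) 0
          == PySem.List.pyGetD (((List.range xs.length).map (fun j => (dcount (xs.reverse.take (j+1)) : Int))).reverse) (((j : Nat) : Int) + 1) 0
        then acc + 1 else acc)
      = (if dcount (xs.take (j+1)) = dcount (xs.drop (j+1)) then acc + 1 else acc) := by
    intro j hj acc
    rw [List.mem_range] at hj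
    have hja : PySem.List.pyGetD ((List.range xs.length).map (fun j => (dcount (xs.take (j+1)) : Int))) ((j : Nat) : Int) 0
        = ((dcount (xs.take (j+1)) : Nat) : Int) := by
      rw [PySem.List.pyGetD_natCast,
        List.getD_eq_getElem _ _ (by rw [List.length_map, List.length_range]; omega)]
      simp
    have hjb : PySem.List.pyGetD (((List.range xs.length).map (fun j => (dcount (xs.reverse.take (j+1)) : Int))).reverse) (((j : Nat) : Int) + 1) 0
        = ((dcount (xs.drop (j+1)) : Nat) : Int) := by
      rw [show (((j : Nat) : Int) + 1) = (((j + 1 : Nat)) : Int) by push_cast; ring]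
      rw [PySem.List.pyGetD_natCast,
        List.getD_eq_getElem _ _ (by rw [List.length_reverse, List.length_map, List.length_range]; omega)]
      rw [List.getElem_reverse]
      simp only [List.length_map, List.length_range, List.getElem_map, List.getElem_range]
      have hrt : xs.reverse.take (xs.length - 1 - (j + 1) + 1) = (xs.drop (j+1)).reverse := by
        rw [List.take_reverse, show xs.length - (xs.length - 1 - (j + 1) + 1) = j+1 by omega]
      rw [hrt, dcount_reverse]
    rw [hja, hjb]
    congr 1
    simp [Nat.cast_inj]
  rw [PySem.List.foldl_congr_mem' (List.range (xs.length - 1)) _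
    (fun (acc : Int) j => if dcount (xs.take (j+1)) = dcount (xs.drop (j+1)) then acc + 1 else acc)
    0 hbody]
  rw [PySem.List.foldl_ite_add_one (fun j => dcount (xs.take (j+1)) = dcount (xs.drop (j+1)))]
  ring

-- ===== VERDICT (by name: the statement is the Claim_ definition above) =====
theorem solution_spec : Claim_equal_solution := by
  intro topping _
  unfold Spec_solution
  rw [A_char, B_char]
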